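-- pv_equiv track=rewrite | github.com/kieranpjobrien/nas-av1-pipeline | pipeline/streams.py | _lang_in_bucket
-- ===== SOURCE A (Python) =====
-- _ORIG_LANG_BUCKETS: dict[str, frozenset[str]] = {
--     "en": frozenset({"en", "eng", "english"}),
--     "sv": frozenset({"sv", "swe", "swedish"}),
--     "nl": frozenset({"nl", "nld", "dut", "dutch"}),
--     "de": frozenset({"de", "deu", "ger", "german"}),
--     "fr": frozenset({"fr", "fra", "fre", "french"}),
--     "es": frozenset({"es", "spa", "spanish"}),
--     "it": frozenset({"it", "ita", "italian"}),
--     "ja": frozenset({"ja", "jpn", "japanese"}),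
--     "ko": frozenset({"ko", "kor", "korean"}),
--     "zh": frozenset({"zh", "cn", "chi", "zho", "yue", "cmn", "chinese", "mandarin", "cantonese"}),
--     "pt": frozenset({"pt", "por", "portuguese"}),
--     "ru": frozenset({"ru", "rus", "russian"}),
--     "ar": frozenset({"ar", "ara", "arabic"}),
--     "hi": frozenset({"hi", "hin", "hindi"}),
--     "no": frozenset({"no", "nor", "nob", "nno", "norwegian", "bokmål", "bokmal", "nynorsk"}),
--     "da": frozenset({"da", "dan", "danish"}),
--     "fi": frozenset({"fi", "fin", "finnish"}),
--     "pl": frozenset({"pl", "pol", "polish"}),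
--     "cs": frozenset({"cs", "ces", "cze", "czech"}),
--     "tr": frozenset({"tr", "tur", "turkish"}),
--     "he": frozenset({"he", "heb", "hebrew"}),
--     "th": frozenset({"th", "tha", "thai"}),
--     "vi": frozenset({"vi", "vie", "vietnamese"}),
--     "el": frozenset({"el", "ell", "gre", "greek"}),
-- }
--
-- _UND_TOKENS: frozenset[str] = frozenset({"", "und", "unk", "undetermined"})
--
-- def _lang_in_bucket(lang: str, target: str) -> bool:
--     """True if ``lang`` belongs to the same equivalence bucket as ``target``.
--
--     Both arguments are lowercased and stripped. Empty / und / unk values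
--     match nothing — caller must decide what to do with unknowns.
--     """
--     a = (lang or "").lower().strip()
--     b = (target or "").lower().strip()
--     if not a or not b or a in _UND_TOKENS or b in _UND_TOKENS:
--         return False
--     if a == b:
--         return True
--     for codes in _ORIG_LANG_BUCKETS.values():
--         if a in codes and b in codes:
--             return True
--     return False
-- ===== SOURCE B (Python) =====
-- # B: canonicalization via a flat code->bucket-key table, no per-call bucket scan.
-- _UND_TOKENS: frozenset[str] = frozenset({"", "und", "unk", "undetermined"})
--
-- # Flat reverse index: each language code maps directly to its bucket key.
-- _CODE_TO_BUCKET: dict[str, str] = {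
--     "en": "en", "eng": "en", "english": "en",
--     "sv": "sv", "swe": "sv", "swedish": "sv",
--     "nl": "nl", "nld": "nl", "dut": "nl", "dutch": "nl",
--     "de": "de", "deu": "de", "ger": "de", "german": "de",
--     "fr": "fr", "fra": "fr", "fre": "fr", "french": "fr",
--     "es": "es", "spa": "es", "spanish": "es",
--     "it": "it", "ita": "it", "italian": "it",
--     "ja": "ja", "jpn": "ja", "japanese": "ja",
--     "ko": "ko", "kor": "ko", "korean": "ko",
--     "zh": "zh", "cn": "zh", "chi": "zh", "zho": "zh", "yue": "zh", "cmn": "zh", "chinese": "zh", "mandarin": "zh", "cantonese": "zh",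
--     "pt": "pt", "por": "pt", "portuguese": "pt",
--     "ru": "ru", "rus": "ru", "russian": "ru",
--     "ar": "ar", "ara": "ar", "arabic": "ar",
--     "hi": "hi", "hin": "hi", "hindi": "hi",
--     "no": "no", "nor": "no", "nob": "no", "nno": "no", "norwegian": "no", "bokmål": "no", "bokmal": "no", "nynorsk": "no",
--     "da": "da", "dan": "da", "danish": "da",
--     "fi": "fi", "fin": "fi", "finnish": "fi",
--     "pl": "pl", "pol": "pl", "polish": "pl",
--     "cs": "cs", "ces": "cs", "cze": "cs", "czech": "cs",
--     "tr": "tr", "tur": "tr", "turkish": "tr",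
--     "he": "he", "heb": "he", "hebrew": "he",
--     "th": "th", "tha": "th", "thai": "th",
--     "vi": "vi", "vie": "vi", "vietnamese": "vi",
--     "el": "el", "ell": "el", "gre": "el", "greek": "el",
-- }
--
--
-- def _canon(code: str) -> str | None:
--     """Canonical bucket key for a code (itself if unknown), None for und/empty."""
--     c = (code or "").lower().strip()
--     if c in _UND_TOKENS:
--         return None
--     return _CODE_TO_BUCKET.get(c, c)
--
--
-- def _lang_in_bucket(lang: str, target: str) -> bool:
--     """True if ``lang`` belongs to the same equivalence bucket as ``target``."""
--     ca = _canon(lang)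
--     cb = _canon(target)
--     return ca is not None and ca == cb
-- ===== Notes on version B (the rewrite author's own statement) =====
-- stated objective: alternative
-- what changed: B canonicalises each argument once through a helper (a flat code->bucket-key table, und/empty -> None) and returns whether the two canonical keys exist and are equal, instead of A's guard chain plus a per-call scan over all 24 bucket frozensets testing joint membership.
import Mathlib
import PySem

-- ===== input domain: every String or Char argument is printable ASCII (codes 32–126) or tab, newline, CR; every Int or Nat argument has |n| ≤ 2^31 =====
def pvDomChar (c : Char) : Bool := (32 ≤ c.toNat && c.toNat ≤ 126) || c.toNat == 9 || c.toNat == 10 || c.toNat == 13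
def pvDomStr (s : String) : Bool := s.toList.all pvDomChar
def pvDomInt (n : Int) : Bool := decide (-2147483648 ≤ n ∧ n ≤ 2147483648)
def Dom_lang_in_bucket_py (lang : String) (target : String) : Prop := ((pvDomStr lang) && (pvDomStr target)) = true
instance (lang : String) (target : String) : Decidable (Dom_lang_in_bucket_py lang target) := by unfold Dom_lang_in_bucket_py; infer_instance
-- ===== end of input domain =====

-- B canonicalises each argument through a flat code→bucket-key table (None for und/empty) and compares canonical keys, instead of A's guard chain plus a per-call scan over all bucket sets (alternative structure; same observed cost).


-- ===== PORT A =====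
-- _ORIG_LANG_BUCKETS as an association list (dict → assoc list; frozenset → list of distinct elements)
def origLangBuckets : List (String × List String) :=
  [ ("en", ["en", "eng", "english"]),
    ("sv", ["sv", "swe", "swedish"]),
    ("nl", ["nl", "nld", "dut", "dutch"]),
    ("de", ["de", "deu", "ger", "german"]),
    ("fr", ["fr", "fra", "fre", "french"]),
    ("es", ["es", "spa", "spanish"]),
    ("it", ["it", "ita", "italian"]),
    ("ja", ["ja", "jpn", "japanese"]),
    ("ko", ["ko", "kor", "korean"]),
    ("zh", ["zh", "cn", "chi", "zho", "yue", "cmn", "chinese", "mandarin", "cantonese"]),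
    ("pt", ["pt", "por", "portuguese"]),
    ("ru", ["ru", "rus", "russian"]),
    ("ar", ["ar", "ara", "arabic"]),
    ("hi", ["hi", "hin", "hindi"]),
    ("no", ["no", "nor", "nob", "nno", "norwegian", "bokmål", "bokmal", "nynorsk"]),
    ("da", ["da", "dan", "danish"]),
    ("fi", ["fi", "fin", "finnish"]),
    ("pl", ["pl", "pol", "polish"]),
    ("cs", ["cs", "ces", "cze", "czech"]),
    ("tr", ["tr", "tur", "turkish"]),
    ("he", ["he", "heb", "hebrew"]),
    ("th", ["th", "tha", "thai"]),
    ("vi", ["vi", "vie", "vietnamese"]),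
    ("el", ["el", "ell", "gre", "greek"]) ]

def undTokens : List String := ["", "und", "unk", "undetermined"]

-- the 'for codes in _ORIG_LANG_BUCKETS.values(): if a in codes and b in codes: return True' loop
def scanBuckets (a b : String) : List (List String) → Bool
  | [] => false
  | cs :: rest => if cs.contains a && cs.contains b then true else scanBuckets a b rest

def lang_in_bucket_py (lang : String) (target : String) : Bool :=
  let a := PySem.Str.strip (PySem.Str.lower lang)   -- (lang or "") is lang for strings ("" stays "")
  let b := PySem.Str.strip (PySem.Str.lower target)
  if a == "" || b == "" || undTokens.contains a || undTokens.contains b then false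
  else if a == b then true
  else scanBuckets a b (origLangBuckets.map Prod.snd)

-- ===== PORT B =====
-- _UND_TOKENS of Source B
def undTokensAlt : List String := ["", "und", "unk", "undetermined"]

-- _CODE_TO_BUCKET of Source B: the flat literal code→bucket-key table (dict → assoc list)
def codeToBucketAlt : PySem.Dict String String :=
  PySem.Dict.mk [
    ("en", "en"), ("eng", "en"), ("english", "en"),
    ("sv", "sv"), ("swe", "sv"), ("swedish", "sv"),
    ("nl", "nl"), ("nld", "nl"), ("dut", "nl"), ("dutch", "nl"),
    ("de", "de"), ("deu", "de"), ("ger", "de"), ("german", "de"),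
    ("fr", "fr"), ("fra", "fr"), ("fre", "fr"), ("french", "fr"),
    ("es", "es"), ("spa", "es"), ("spanish", "es"),
    ("it", "it"), ("ita", "it"), ("italian", "it"),
    ("ja", "ja"), ("jpn", "ja"), ("japanese", "ja"),
    ("ko", "ko"), ("kor", "ko"), ("korean", "ko"),
    ("zh", "zh"), ("cn", "zh"), ("chi", "zh"), ("zho", "zh"), ("yue", "zh"), ("cmn", "zh"), ("chinese", "zh"), ("mandarin", "zh"), ("cantonese", "zh"),
    ("pt", "pt"), ("por", "pt"), ("portuguese", "pt"),
    ("ru", "ru"), ("rus", "ru"), ("russian", "ru"),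
    ("ar", "ar"), ("ara", "ar"), ("arabic", "ar"),
    ("hi", "hi"), ("hin", "hi"), ("hindi", "hi"),
    ("no", "no"), ("nor", "no"), ("nob", "no"), ("nno", "no"), ("norwegian", "no"), ("bokmål", "no"), ("bokmal", "no"), ("nynorsk", "no"),
    ("da", "da"), ("dan", "da"), ("danish", "da"),
    ("fi", "fi"), ("fin", "fi"), ("finnish", "fi"),
    ("pl", "pl"), ("pol", "pl"), ("polish", "pl"),
    ("cs", "cs"), ("ces", "cs"), ("cze", "cs"), ("czech", "cs"),
    ("tr", "tr"), ("tur", "tr"), ("turkish", "tr"),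
    ("he", "he"), ("heb", "he"), ("hebrew", "he"),
    ("th", "th"), ("tha", "th"), ("thai", "th"),
    ("vi", "vi"), ("vie", "vi"), ("vietnamese", "vi"),
    ("el", "el"), ("ell", "el"), ("gre", "el"), ("greek", "el")
  ]

-- _canon of Source B: None for und/empty, else the bucket key (the code itself if unknown)
def canonAlt (code : String) : Option String :=
  let c := PySem.Str.strip (PySem.Str.lower code)
  if undTokensAlt.contains c then none
  else some (codeToBucketAlt.getD c c)

-- 'ca is not None and ca == cb'
def lang_in_bucket_py_alt (lang : String) (target : String) : Bool :=
  match canonAlt lang, canonAlt target with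
  | some ca, some cb => ca == cb
  | _, _ => false

-- ===== PRECONDITION & SPEC =====
def Spec_lang_in_bucket_py (lang : String) (target : String) (out : Bool) : Prop := out = lang_in_bucket_py_alt lang target
instance (lang : String) (target : String) (out : Bool) : Decidable (Spec_lang_in_bucket_py lang target out) := by unfold Spec_lang_in_bucket_py; infer_instance

-- ===== CLAIM (what is proved, stated in full; the proofs are below) =====
def Claim_equal_lang_in_bucket_py : Prop := ∀ (lang : String) (target : String), Dom_lang_in_bucket_py lang target → Spec_lang_in_bucket_py lang target (lang_in_bucket_py lang target)

-- ===== LEMMAS AND PROOFS =====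

-- the reverse index flattened: one (code, bucket-key) pair per code
def expandBuckets (L : List (String × List String)) : List (String × String) :=
  L.flatMap (fun p => p.2.map (fun c => (c, p.1)))

-- first-match association lookup (shape of Dict.get? on a literal)
def alook (x : String) : List (String × String) → Option String
  | [] => none
  | (k, v) :: rest => if k == x then some v else alook x rest

theorem get?_mk_eq_alook (l : List (String × String)) (x : String) :
    (PySem.Dict.mk l).get? x = alook x l := by
  induction l with
  | nil => rfl
  | cons p rest ih =>
    obtain ⟨k, v⟩ := p
    rw [PySem.Dict.get?_mk_cons, alook]
    split <;> simp_all

theorem codeToBucketAlt_eq : codeToBucketAlt = PySem.Dict.mk (expandBuckets origLangBuckets) := rfl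

theorem alook_append_bucket (cs : List String) (k x : String) (tail : List (String × String)) :
    alook x (cs.map (fun c => (c, k)) ++ tail)
      = if cs.contains x then some k else alook x tail := by
  induction cs with
  | nil => simp
  | cons c cs ih =>
    simp only [List.map_cons, List.cons_append, alook, List.contains_cons, ih]
    by_cases h : c = x
    · simp [h]
    · simp [h, Ne.symm h]

theorem alook_mem (l : List (String × String)) (x v : String)
    (h : alook x l = some v) : (x, v) ∈ l := by
  induction l with
  | nil => simp [alook] at h
  | cons p rest ih =>
    obtain ⟨k, w⟩ := p
    simp only [alook] at h
    split at h
    · rename_i hk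
      rw [beq_iff_eq] at hk
      subst hk
      injection h with h2
      subst h2
      exact List.mem_cons_self
    · exact List.mem_cons_of_mem _ (ih h)

theorem alook_none_not_key (l : List (String × String)) (x : String)
    (h : alook x l = none) : x ∉ l.map Prod.fst := by
  induction l with
  | nil => simp
  | cons p rest ih =>
    obtain ⟨k, v⟩ := p
    simp only [alook] at h
    split at h
    · exact absurd h (by simp)
    · rename_i hk
      simp only [List.map_cons, List.mem_cons]
      rintro (rfl | hm)
      · exact hk (by simp)
      · exact ih h hm

theorem scan_false_of_not_mem_left (a b : String) (bs : List (List String))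
    (h : ∀ cs ∈ bs, cs.contains a = false) : scanBuckets a b bs = false := by
  induction bs with
  | nil => rfl
  | cons cs rest ih =>
    simp only [scanBuckets, h cs List.mem_cons_self, Bool.false_and, if_neg Bool.false_ne_true]
    exact ih (fun cs' hm => h cs' (List.mem_cons_of_mem _ hm))

theorem scan_false_of_not_mem_right (a b : String) (bs : List (List String))
    (h : ∀ cs ∈ bs, cs.contains b = false) : scanBuckets a b bs = false := by
  induction bs with
  | nil => rfl
  | cons cs rest ih =>
    simp only [scanBuckets, h cs List.mem_cons_self, Bool.and_false, if_neg Bool.false_ne_true]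
    exact ih (fun cs' hm => h cs' (List.mem_cons_of_mem _ hm))

-- values of the expanded index are bucket keys
theorem expand_snd_subset (L : List (String × List String)) (c v : String)
    (h : (c, v) ∈ expandBuckets L) : v ∈ L.map Prod.fst := by
  induction L with
  | nil => simp [expandBuckets] at h
  | cons p rest ih =>
    simp only [expandBuckets, List.flatMap_cons, List.mem_append, List.mem_map] at h
    rcases h with ⟨c', hc', he⟩ | h
    · cases he; simp
    · exact List.mem_cons_of_mem _ (ih h)

-- a code found in some bucket is a key of the expanded index
theorem mem_keys_expand_of_mem (L : List (String × List String)) (cs : List String) (x : String)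
    (hcs : cs ∈ L.map Prod.snd) (hx : x ∈ cs) : x ∈ (expandBuckets L).map Prod.fst := by
  induction L with
  | nil => simp at hcs
  | cons p rest ih =>
    simp only [List.map_cons, List.mem_cons] at hcs
    simp only [expandBuckets, List.flatMap_cons, List.map_append, List.mem_append]
    rcases hcs with rfl | hcs
    · left; simp only [List.map_map]
      refine List.mem_map.mpr ⟨x, hx, rfl⟩
    · right; exact ih hcs

-- each bucket's key is listed among its own codes
theorem key_in_own_bucket : ∀ q ∈ origLangBuckets, q.1 ∈ q.2 := by decide

-- every value of the expanded index is itself one of its keys (each bucket key is a member of its own bucket)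
theorem values_are_keys :
    ∀ p ∈ expandBuckets origLangBuckets, p.2 ∈ (expandBuckets origLangBuckets).map Prod.fst := by
  intro p hp
  have hv : p.2 ∈ origLangBuckets.map Prod.fst :=
    expand_snd_subset origLangBuckets p.1 p.2 hp
  obtain ⟨q, hq, hqe⟩ := List.mem_map.mp hv
  rw [← hqe]
  exact mem_keys_expand_of_mem origLangBuckets q.2 q.1
    (List.mem_map_of_mem hq) (key_in_own_bucket q hq)

-- core: scanning all buckets for joint membership = comparing reverse-index lookups
theorem scan_eq_lookup (a b : String) (L : List (String × List String))
    (hkeys : ((expandBuckets L).map Prod.fst).Nodup)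
    (hbk : (L.map Prod.fst).Nodup) :
    scanBuckets a b (L.map Prod.snd)
      = (match alook a (expandBuckets L) with
         | none => false
         | some ka => alook b (expandBuckets L) == some ka) := by
  induction L with
  | nil => rfl
  | cons p rest ih =>
    obtain ⟨k, cs⟩ := p
    have hexp : expandBuckets ((k, cs) :: rest)
        = cs.map (fun c => (c, k)) ++ expandBuckets rest := by
      simp [expandBuckets]
    rw [hexp] at hkeys ⊢
    rw [List.map_append] at hkeys
    have hfst : (cs.map (fun c => (c, k))).map Prod.fst = cs := by
      simp [List.map_map, Function.comp_def]
    rw [hfst] at hkeys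
    rw [List.nodup_append] at hkeys
    obtain ⟨-, hkr, hdisj⟩ := hkeys
    simp only [List.map_cons, List.nodup_cons] at hbk
    obtain ⟨hknot, hbk'⟩ := hbk
    -- a (or b) in cs is then in no bucket of rest
    have hnotrest : ∀ x : String, x ∈ cs → ∀ cs' ∈ rest.map Prod.snd, cs'.contains x = false := by
      intro x hx cs' hcs'
      by_contra hcon
      rw [Bool.not_eq_false, List.contains_eq_mem, decide_eq_true_eq] at hcon
      exact hdisj x hx x (mem_keys_expand_of_mem rest cs' x hcs' hcon) rfl
    -- a lookup in the rest-index never returns this bucket key k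
    have hnotk : ∀ x : String, alook x (expandBuckets rest) ≠ some k := by
      intro x hcon
      exact hknot (expand_snd_subset rest x k (alook_mem _ _ _ hcon))
    simp only [List.map_cons, scanBuckets]
    rw [alook_append_bucket, alook_append_bucket]
    by_cases ha : a ∈ cs <;> by_cases hb : b ∈ cs
    · simp [List.contains_eq_mem, ha, hb]
    · rw [scan_false_of_not_mem_left a b _ (hnotrest a ha)]
      cases halb : alook b (expandBuckets rest) with
      | none => simp [List.contains_eq_mem, ha, hb]
      | some v =>
        have hv : v ≠ k := fun h => hnotk b (h ▸ halb)
        simp [List.contains_eq_mem, ha, hb, hv]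
    · rw [scan_false_of_not_mem_right a b _ (hnotrest b hb)]
      cases hala : alook a (expandBuckets rest) with
      | none => simp [List.contains_eq_mem, ha, hb]
      | some v =>
        have hv : ¬ k = v := fun h => hnotk a (by rw [hala, h])
        simp [List.contains_eq_mem, ha, hb, hv]
    · simp only [List.contains_eq_mem, ha, hb, decide_false, Bool.and_false,
        if_neg Bool.false_ne_true]
      exact ih hkr hbk'

-- the scan equals comparison of default-to-self lookups, given the codes differ
theorem scan_eq_getD_cmp (a b : String) (hab : a ≠ b) :
    scanBuckets a b (origLangBuckets.map Prod.snd)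
      = ((alook a (expandBuckets origLangBuckets)).getD a
          == (alook b (expandBuckets origLangBuckets)).getD b) := by
  rw [scan_eq_lookup a b origLangBuckets (by decide) (by decide)]
  cases hala : alook a (expandBuckets origLangBuckets) with
  | none =>
    cases halb : alook b (expandBuckets origLangBuckets) with
    | none => simp [Option.getD, hab]
    | some kb =>
      -- a is not a key of the index but kb is, so a ≠ kb
      have hk : kb ∈ (expandBuckets origLangBuckets).map Prod.fst :=
        values_are_keys (b, kb) (alook_mem _ _ _ halb)
      have hna := alook_none_not_key _ a hala
      have : a ≠ kb := fun h => hna (h ▸ hk)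
      simp [Option.getD, this]
  | some ka =>
    cases halb : alook b (expandBuckets origLangBuckets) with
    | none =>
      have hk : ka ∈ (expandBuckets origLangBuckets).map Prod.fst :=
        values_are_keys (a, ka) (alook_mem _ _ _ hala)
      have hnb := alook_none_not_key _ b halb
      have hne : ka ≠ b := fun h => hnb (h ▸ hk)
      simp only [Option.getD]
      rw [beq_eq_false_iff_ne.mpr hne]
      simp
    | some kb =>
      simp only [Option.getD]
      by_cases h : ka = kb <;> simp [h, eq_comm]

-- ===== VERDICT (by name: the statement is the Claim_ definition above) =====
theorem lang_in_bucket_py_spec : Claim_equal_lang_in_bucket_py := by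
  intro lang target _
  unfold Spec_lang_in_bucket_py lang_in_bucket_py lang_in_bucket_py_alt canonAlt
  rw [codeToBucketAlt_eq]
  generalize PySem.Str.strip (PySem.Str.lower lang) = a
  generalize PySem.Str.strip (PySem.Str.lower target) = b
  simp only [PySem.Dict.getD_eq_get?_getD, get?_mk_eq_alook]
  have hund : undTokensAlt = undTokens := rfl
  rw [hund]
  have hemem : "" ∈ undTokens := by simp [undTokens]
  by_cases hca : a ∈ undTokens
  · simp [List.contains_eq_mem, hca]
  · by_cases hcb : b ∈ undTokens
    · simp [List.contains_eq_mem, hcb]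
    · have hae : ¬ a = "" := fun h => hca (h ▸ hemem)
      have hbe : ¬ b = "" := fun h => hcb (h ▸ hemem)
      by_cases hab : a = b
      · subst hab
        simp [List.contains_eq_mem, hca, hae]
      · have h1 : (a == "") = false := beq_eq_false_iff_ne.mpr hae
        have h2 : (b == "") = false := beq_eq_false_iff_ne.mpr hbe
        have h3 : (a == b) = false := beq_eq_false_iff_ne.mpr hab
        simp only [List.contains_eq_mem, hca, hcb, h1, h2, h3, decide_false,
          Bool.or_false, if_neg Bool.false_ne_true]
        exact scan_eq_getD_cmp a b hab
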